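-- pv_equiv track=rewrite | github.com/SzymonIwaniuk/wdi-2024-2025 | Zestaw3/zad102.py | solve
-- ===== SOURCE A (Python) =====
-- def identyczne(a, b):
--     d = [False for _ in range(10)]
--     while a > 0:
--         d[a%10] = True
--         a //= 10
--     while b > 0:
--         if d[b%10] != True:
--             return False
--         b //= 10
--     return True
--
-- def bff(T, N, i, j):
--     num = T[i][j]
--     if i - 1 >= 0:
--         if not identyczne(T[i - 1][j], T[i][j]):
--             return False
--     if i + 1 < N:
--         if not identyczne(T[i + 1][j], T[i][j]):
--             return False
--     if j - 1 >= 0: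
--         if not identyczne(T[i][j - 1], T[i][j]):
--             return False
--     if j + 1 < N:
--         if not identyczne(T[i][j + 1], T[i][j]):
--             return False
--     return True
--
-- def solve(T):
--     N = len(T)
--     cnt = 0
--     for i in range(N):
--         for j in range(N):
--             if bff(T, N, i, j):
--                 cnt += 1
--     return cnt
-- ===== SOURCE B (Python) =====
-- def _mask(v):
--     m = 0
--     while v > 0:
--         m |= 1 << (v % 10)
--         v //= 10
--     return m
--
-- def solve(T):
--     N = len(T)
--     M = [[_mask(T[i][j]) for j in range(N)] for i in range(N)]
--     bad = set()
--     # horizontal edges: each adjacency examined once, both endpoints judged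
--     for i in range(N):
--         for j in range(N - 1):
--             a, b = M[i][j], M[i][j + 1]
--             if a & b != a:
--                 bad.add((i, j))
--             if a & b != b:
--                 bad.add((i, j + 1))
--     # vertical edges
--     for i in range(N - 1):
--         for j in range(N):
--             a, b = M[i][j], M[i + 1][j]
--             if a & b != a:
--                 bad.add((i, j))
--             if a & b != b:
--                 bad.add((i + 1, j))
--     cnt = 0
--     for i in range(N):
--         for j in range(N):
--             if (i, j) not in bad:
--                 cnt += 1
--     return cnt
-- ===== Notes on version B (the rewrite author's own statement) =====
-- stated objective: faster
-- what changed: B replaces A's per-cell scan of four neighbors (rebuilding a 10-slot boolean digit table for every cell/neighbor pair) by an edge-based pass: each grid adjacency is visited once, endpoints whose precomputed digit bitmask is not contained in the mask across the edge are marked in a bad-cell set, and a final pass counts cells absent from that set.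
import Mathlib
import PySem

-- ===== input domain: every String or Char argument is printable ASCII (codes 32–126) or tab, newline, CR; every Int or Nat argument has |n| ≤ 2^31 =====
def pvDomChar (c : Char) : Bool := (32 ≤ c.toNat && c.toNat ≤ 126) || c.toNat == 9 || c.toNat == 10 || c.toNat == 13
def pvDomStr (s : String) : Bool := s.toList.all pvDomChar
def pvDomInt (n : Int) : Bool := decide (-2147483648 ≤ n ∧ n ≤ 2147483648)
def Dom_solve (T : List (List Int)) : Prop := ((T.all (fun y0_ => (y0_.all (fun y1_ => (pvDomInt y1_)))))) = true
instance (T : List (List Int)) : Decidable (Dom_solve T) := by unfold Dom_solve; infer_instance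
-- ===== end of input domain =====

-- B replaces A's per-cell 4-neighbor digit-table check by an edge pass: each grid adjacency is
-- visited once, endpoints whose precomputed digit bitmask is not contained in the mask across the
-- edge go into a bad-cell set, and a final pass counts cells absent from it (measured faster).


-- termination helper for the digit loops (a // 10 shrinks for a > 0)
theorem pvFloordiv10_toNat_lt {a : Int} (h : 0 < a) :
    (PySem.Int.floordiv a 10).toNat < a.toNat := by
  rw [PySem.Int.floordiv_eq_ediv_of_pos (by omega)]
  omega

-- ===== PORT A =====
-- T[i][j]; exact under Pre_solve: every index used is nonnegative and within bounds
def pvCell (T : List (List Int)) (i j : Int) : Int :=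
  PySem.List.pyGetD (PySem.List.pyGetD T i []) j 0

-- first while of identyczne: d[a%10] = True; a //= 10   (a%10 ∈ [0,10) for a > 0, so .toNat is exact)
def identyczneLoop1 (a : Int) (d : List Bool) : List Bool :=
  if h : 0 < a then
    identyczneLoop1 (PySem.Int.floordiv a 10) (d.set (PySem.Int.mod a 10).toNat true)
  else d
termination_by a.toNat
decreasing_by exact pvFloordiv10_toNat_lt h

-- second while of identyczne (getD is exact: index < 10 = d.length)
def identyczneLoop2 (b : Int) (d : List Bool) : Bool :=
  if h : 0 < b then
    if d.getD (PySem.Int.mod b 10).toNat false != true then false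
    else identyczneLoop2 (PySem.Int.floordiv b 10) d
  else true
termination_by b.toNat
decreasing_by exact pvFloordiv10_toNat_lt h

def identyczne (a b : Int) : Bool :=
  identyczneLoop2 b (identyczneLoop1 a (List.replicate 10 false))

def bff (T : List (List Int)) (N i j : Int) : Bool :=
  if decide (0 ≤ i - 1) && !identyczne (pvCell T (i-1) j) (pvCell T i j) then false
  else if decide (i + 1 < N) && !identyczne (pvCell T (i+1) j) (pvCell T i j) then false
  else if decide (0 ≤ j - 1) && !identyczne (pvCell T i (j-1)) (pvCell T i j) then false
  else if decide (j + 1 < N) && !identyczne (pvCell T i (j+1)) (pvCell T i j) then false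
  else true

def solve (T : List (List Int)) : Int :=
  let N : Int := T.length
  (PySem.List.pyRange 0 N 1).foldl (fun cnt i =>
    (PySem.List.pyRange 0 N 1).foldl (fun cnt j =>
      if bff T N i j then cnt + 1 else cnt) cnt) 0

-- ===== PORT B =====
-- the mask m is a nonnegative Python int, represented as Nat (same numeric value);
-- .toNat on v % 10 is exact since 0 ≤ v % 10 for v > 0
def maskLoop (v : Int) (m : Nat) : Nat :=
  if h : 0 < v then
    maskLoop (PySem.Int.floordiv v 10) (m ||| (1 <<< (PySem.Int.mod v 10).toNat))
  else m
termination_by v.toNat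
decreasing_by exact pvFloordiv10_toNat_lt h

def dmask (v : Int) : Nat := maskLoop v 0

def mAt (M : List (List Nat)) (i j : Int) : Nat :=
  PySem.List.pyGetD (PySem.List.pyGetD M i []) j 0

def buildM (T : List (List Int)) (N : Int) : List (List Nat) :=
  (PySem.List.pyRange 0 N 1).map (fun i =>
    (PySem.List.pyRange 0 N 1).map (fun j => dmask (pvCell T i j)))

-- body of the horizontal-edge loop: judge both endpoints of edge (i,j)-(i,j+1)
def hStep (M : List (List Nat)) (i : Int) (s : PySem.Set (Int × Int)) (j : Int) :
    PySem.Set (Int × Int) :=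
  if (mAt M i j &&& mAt M i (j+1)) != mAt M i (j+1) then
    PySem.Set.add (if (mAt M i j &&& mAt M i (j+1)) != mAt M i j then PySem.Set.add s (i, j) else s) (i, j+1)
  else (if (mAt M i j &&& mAt M i (j+1)) != mAt M i j then PySem.Set.add s (i, j) else s)

-- body of the vertical-edge loop: judge both endpoints of edge (i,j)-(i+1,j)
def vStep (M : List (List Nat)) (i : Int) (s : PySem.Set (Int × Int)) (j : Int) :
    PySem.Set (Int × Int) :=
  if (mAt M i j &&& mAt M (i+1) j) != mAt M (i+1) j then
    PySem.Set.add (if (mAt M i j &&& mAt M (i+1) j) != mAt M i j then PySem.Set.add s (i, j) else s) (i+1, j)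
  else (if (mAt M i j &&& mAt M (i+1) j) != mAt M i j then PySem.Set.add s (i, j) else s)

def badSet (M : List (List Nat)) (N : Int) : PySem.Set (Int × Int) :=
  (PySem.List.pyRange 0 (N-1) 1).foldl
    (fun s i => (PySem.List.pyRange 0 N 1).foldl (vStep M i) s)
    ((PySem.List.pyRange 0 N 1).foldl
      (fun s i => (PySem.List.pyRange 0 (N-1) 1).foldl (hStep M i) s) PySem.Set.empty)

def solve_alt (T : List (List Int)) : Int :=
  let N : Int := T.length
  let M := buildM T N
  let bad := badSet M N
  (PySem.List.pyRange 0 N 1).foldl (fun cnt i =>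
    (PySem.List.pyRange 0 N 1).foldl (fun cnt j =>
      if !(PySem.Set.contains bad (i, j)) then cnt + 1 else cnt) cnt) 0

-- ===== PRECONDITION & SPEC =====
-- Python A indexes T[i][j] for all j < len(T): any row shorter than len(T) raises IndexError.
def Pre_solve (T : List (List Int)) : Prop := ∀ r ∈ T, T.length ≤ r.length
instance (T : List (List Int)) : Decidable (Pre_solve T) := by unfold Pre_solve; infer_instance
def pvWitness_solve : List (List Int) := [[12, 21], [121, 2]]

def Spec_solve (T : List (List Int)) (out : Int) : Prop := out = solve_alt T
instance (T : List (List Int)) (out : Int) : Decidable (Spec_solve T out) := by unfold Spec_solve; infer_instance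

-- ===== CLAIM (what is proved, stated in full; the proofs are below) =====
def Claim_equal_solve : Prop := ∀ (T : List (List Int)), Dom_solve T → Pre_solve T → Spec_solve T (solve T)

-- ===== LEMMAS AND PROOFS =====

-- proof-side reference: digit k occurs in v's Python digit expansion (the while v>0 loop)
def hasDig (v : Int) (k : Nat) : Bool :=
  if h : 0 < v then (PySem.Int.mod v 10 == (k : Int)) || hasDig (PySem.Int.floordiv v 10) k
  else false
termination_by v.toNat
decreasing_by exact pvFloordiv10_toNat_lt h

theorem hasDig_pos {v : Int} {k : Nat} (h : 0 < v) :
    hasDig v k = ((PySem.Int.mod v 10 == (k : Int)) || hasDig (PySem.Int.floordiv v 10) k) := by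
  rw [hasDig.eq_def]; simp [h]

theorem hasDig_nonpos {v : Int} {k : Nat} (h : ¬ 0 < v) : hasDig v k = false := by
  rw [hasDig.eq_def]; simp [h]

theorem getD_replicate_false (k : Nat) : (List.replicate 10 false).getD k false = false := by
  rcases Nat.lt_or_ge k 10 with h | h
  · rw [List.getD_eq_getElem?_getD, List.getElem?_eq_getElem (by simpa using h)]
    exact List.getElem_replicate _
  · rw [List.getD_eq_getElem?_getD, List.getElem?_eq_none (by simpa using h)]
    rfl

theorem loop1_getD (a : Int) (d : List Bool) (k : Nat) :
    d.length = 10 → (identyczneLoop1 a d).getD k false = (d.getD k false || hasDig a k) := by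
  fun_induction identyczneLoop1 a d
  case case1 a d h ih =>
    intro hlen
    rw [ih (by simpa using hlen), hasDig_pos h]
    have pm0 := PySem.Int.mod_nonneg a (b := 10) (by omega)
    have pm1 := PySem.Int.mod_lt a (b := 10) (by omega)
    by_cases hk : k = (PySem.Int.mod a 10).toNat
    · subst hk
      have hbeq : (PySem.Int.mod a 10 == ((PySem.Int.mod a 10).toNat : Int)) = true := by
        rw [beq_iff_eq]; omega
      have hset : (d.set (PySem.Int.mod a 10).toNat true).getD (PySem.Int.mod a 10).toNat false
          = true := by
        rw [List.getD_eq_getElem?_getD, List.getElem?_set,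
          if_pos rfl, if_pos (show (PySem.Int.mod a 10).toNat < d.length by omega)]
        rfl
      rw [hset, hbeq]; simp
    · have hne : (PySem.Int.mod a 10 == (k : Int)) = false := by
        rw [beq_eq_false_iff_ne]; omega
      have hset : (d.set (PySem.Int.mod a 10).toNat true).getD k false = d.getD k false := by
        rw [List.getD_eq_getElem?_getD, List.getElem?_set, if_neg (Ne.symm hk),
          ← List.getD_eq_getElem?_getD]
      rw [hset, hne]; simp
  case case2 a d h => intro _; rw [hasDig_nonpos h]; simp

theorem loop2_iff (b : Int) (d : List Bool) :
    identyczneLoop2 b d = true ↔ ∀ k : Nat, hasDig b k = true → d.getD k false = true := by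
  fun_induction identyczneLoop2 b d
  case case1 b hb hd =>
    have hd' : d.getD (PySem.Int.mod b 10).toNat false = false := by simpa using hd
    constructor
    · intro hfalse; exact absurd hfalse (by simp)
    · intro hall
      have hm0 := PySem.Int.mod_nonneg b (b := 10) (by omega)
      have hdig : hasDig b ((PySem.Int.mod b 10).toNat) = true := by
        have hbeq : (PySem.Int.mod b 10 == (((PySem.Int.mod b 10).toNat : Nat) : Int)) = true := by
          rw [beq_iff_eq]; omega
        rw [hasDig_pos hb, hbeq, Bool.true_or]
      have := hall _ hdig
      rw [hd'] at this
      exact absurd this (by simp)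
  case case2 b hb hd ih =>
    have hd' : d.getD (PySem.Int.mod b 10).toNat false = true := by simpa using hd
    rw [ih]
    have hm0 := PySem.Int.mod_nonneg b (b := 10) (by omega)
    constructor
    · intro hall k hk
      rw [hasDig_pos hb, Bool.or_eq_true] at hk
      rcases hk with h1 | h1
      · rw [beq_iff_eq] at h1
        have : k = (PySem.Int.mod b 10).toNat := by omega
        rw [this]; exact hd'
      · exact hall k h1
    · intro hall k hk
      exact hall k (by rw [hasDig_pos hb, hk, Bool.or_true])
  case case3 b hb =>
    constructor
    · intro _ k hk
      rw [hasDig_nonpos hb] at hk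
      exact absurd hk (by simp)
    · intro _; rfl

theorem maskLoop_testBit (v : Int) (m : Nat) (k : Nat) :
    (maskLoop v m).testBit k = (m.testBit k || hasDig v k) := by
  fun_induction maskLoop v m
  case case1 v m h ih =>
    rw [ih, hasDig_pos h, Nat.testBit_or, Nat.one_shiftLeft, Nat.testBit_two_pow]
    have hm0 := PySem.Int.mod_nonneg v (b := 10) (by omega)
    have heq : (decide ((PySem.Int.mod v 10).toNat = k)) = (PySem.Int.mod v 10 == (k : Int)) := by
      rw [Bool.eq_iff_iff, decide_eq_true_eq, beq_iff_eq]; omega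
    rw [heq, Bool.or_assoc]
  case case2 v m h => rw [hasDig_nonpos h]; simp

theorem mask_subset_iff (m1 m2 : Nat) :
    ((m1 &&& m2) == m1) = true ↔ ∀ k, m1.testBit k = true → m2.testBit k = true := by
  rw [beq_iff_eq]
  constructor
  · intro h k hk
    have := congrArg (fun x => x.testBit k) h
    simp only [Nat.testBit_and, hk, Bool.true_and] at this
    exact this
  · intro h
    apply Nat.eq_of_testBit_eq
    intro k
    rw [Nat.testBit_and]
    by_cases hk : m1.testBit k = true
    · simp [hk, h k hk]
    · simp only [Bool.not_eq_true] at hk; simp [hk]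

-- A's identyczne(a, b) is exactly "mask(b) subset of mask(a)"
theorem identyczne_eq_mask (a b : Int) :
    identyczne a b = ((dmask b &&& dmask a) == dmask b) := by
  rw [Bool.eq_iff_iff, identyczne, loop2_iff, mask_subset_iff]
  constructor
  · intro h k hk
    rw [dmask, maskLoop_testBit] at hk
    rw [dmask, maskLoop_testBit]
    simp only [Nat.zero_testBit, Bool.false_or] at hk ⊢
    have h2 := h k hk
    rw [loop1_getD a _ k (by simp), getD_replicate_false k, Bool.false_or] at h2
    exact h2
  · intro h k hk
    rw [loop1_getD a _ k (by simp), getD_replicate_false k, Bool.false_or]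
    have hb' : (dmask b).testBit k = true := by
      rw [dmask, maskLoop_testBit]; simp [hk]
    have h2 := h k hb'
    rw [dmask, maskLoop_testBit] at h2
    simpa using h2

theorem mAt_buildM (T : List (List Int)) (N x y : Int)
    (hx : 0 ≤ x) (hx' : x < N) (hy : 0 ≤ y) (hy' : y < N) :
    mAt (buildM T N) x y = dmask (pvCell T x y) := by
  rw [mAt, buildM]
  rw [PySem.List.pyGetD_map_pyRange_of_nonneg _ _ _ _ hx hx']
  rw [PySem.List.pyGetD_map_pyRange_of_nonneg _ _ _ _ hy hy']

-- membership in a fold that only conditionally adds elements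
theorem mem_foldl_step {α β : Type} [BEq β] [LawfulBEq β]
    (f : PySem.Set β → α → PySem.Set β) (P : β → α → Prop)
    (hf : ∀ s a x, x ∈ f s a ↔ x ∈ s ∨ P x a)
    (l : List α) (s : PySem.Set β) (x : β) :
    x ∈ l.foldl f s ↔ x ∈ s ∨ ∃ a ∈ l, P x a := by
  induction l generalizing s with
  | nil => simp
  | cons a l ih =>
    rw [List.foldl_cons, ih, hf]
    simp only [List.mem_cons]
    constructor
    · rintro ((h | h) | ⟨b, hb, hp⟩)
      · exact Or.inl h
      · exact Or.inr ⟨a, Or.inl rfl, h⟩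
      · exact Or.inr ⟨b, Or.inr hb, hp⟩
    · rintro (h | ⟨b, (rfl | hb), hp⟩)
      · exact Or.inl (Or.inl h)
      · exact Or.inl (Or.inr hp)
      · exact Or.inr ⟨b, hb, hp⟩

-- what the horizontal-edge body contributes
def Ph (M : List (List Nat)) (x : Int × Int) (i j : Int) : Prop :=
  (x = (i, j) ∧ mAt M i j &&& mAt M i (j+1) ≠ mAt M i j) ∨
  (x = (i, j+1) ∧ mAt M i j &&& mAt M i (j+1) ≠ mAt M i (j+1))

-- what the vertical-edge body contributes
def Pv (M : List (List Nat)) (x : Int × Int) (i j : Int) : Prop :=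
  (x = (i, j) ∧ mAt M i j &&& mAt M (i+1) j ≠ mAt M i j) ∨
  (x = (i+1, j) ∧ mAt M i j &&& mAt M (i+1) j ≠ mAt M (i+1) j)

theorem mem_hStep (M : List (List Nat)) (i : Int) (s : PySem.Set (Int × Int)) (j : Int)
    (x : Int × Int) : x ∈ hStep M i s j ↔ x ∈ s ∨ Ph M x i j := by
  unfold hStep Ph
  split_ifs with h1 h2 h2 <;>
    simp only [PySem.Set.mem_add, bne_iff_ne, ne_eq, not_not] at * <;> tauto

theorem mem_vStep (M : List (List Nat)) (i : Int) (s : PySem.Set (Int × Int)) (j : Int)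
    (x : Int × Int) : x ∈ vStep M i s j ↔ x ∈ s ∨ Pv M x i j := by
  unfold vStep Pv
  split_ifs with h1 h2 h2 <;>
    simp only [PySem.Set.mem_add, bne_iff_ne, ne_eq, not_not] at * <;> tauto

theorem mem_badSet (M : List (List Nat)) (N : Int) (x : Int × Int) :
    x ∈ badSet M N ↔
      (∃ i, (0 ≤ i ∧ i < N) ∧ ∃ j, (0 ≤ j ∧ j < N - 1) ∧ Ph M x i j) ∨
      (∃ i, (0 ≤ i ∧ i < N - 1) ∧ ∃ j, (0 ≤ j ∧ j < N) ∧ Pv M x i j) := by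
  unfold badSet
  rw [mem_foldl_step _ (fun x i => ∃ j ∈ PySem.List.pyRange 0 N 1, Pv M x i j)
      (fun s a x => mem_foldl_step _ (Pv M · a ·) (mem_vStep M a) _ s x),
    mem_foldl_step _ (fun x i => ∃ j ∈ PySem.List.pyRange 0 (N-1) 1, Ph M x i j)
      (fun s a x => mem_foldl_step _ (Ph M · a ·) (mem_hStep M a) _ s x)]
  simp only [PySem.List.mem_pyRange_one, PySem.Set.empty]
  constructor
  · rintro ((h | ⟨i, hi, j, hj, hp⟩) | ⟨i, hi, j, hj, hp⟩)
    · simp at h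
    · exact Or.inl ⟨i, by omega, j, by omega, hp⟩
    · exact Or.inr ⟨i, by omega, j, by omega, hp⟩
  · rintro (⟨i, hi, j, hj, hp⟩ | ⟨i, hi, j, hj, hp⟩)
    · exact Or.inl (Or.inr ⟨i, by omega, j, by omega, hp⟩)
    · exact Or.inr ⟨i, by omega, j, by omega, hp⟩

-- pointwise: cell (i,j) is in the bad set exactly when some in-bounds neighbor's mask fails
theorem cell_bad_iff (M : List (List Nat)) (N i j : Int)
    (hi0 : 0 ≤ i) (hi1 : i < N) (hj0 : 0 ≤ j) (hj1 : j < N) :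
    ((i, j) ∈ badSet M N) ↔
      (0 ≤ j - 1 ∧ mAt M i (j-1) &&& mAt M i j ≠ mAt M i j) ∨
      (j + 1 < N ∧ mAt M i j &&& mAt M i (j+1) ≠ mAt M i j) ∨
      (0 ≤ i - 1 ∧ mAt M (i-1) j &&& mAt M i j ≠ mAt M i j) ∨
      (i + 1 < N ∧ mAt M i j &&& mAt M (i+1) j ≠ mAt M i j) := by
  rw [mem_badSet]
  unfold Ph Pv
  constructor
  · rintro (⟨i', hi', j', hj', (⟨hx, hm⟩ | ⟨hx, hm⟩)⟩ | ⟨i', hi', j', hj', (⟨hx, hm⟩ | ⟨hx, hm⟩)⟩) <;>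
      rw [Prod.mk.injEq] at hx <;> obtain ⟨h1, h2⟩ := hx
    · subst h1; subst h2; exact Or.inr (Or.inl ⟨by omega, hm⟩)
    · have hi'' : i' = i := h1.symm
      have hj'' : j' = j - 1 := by omega
      subst hi''; subst hj''
      rw [show j - 1 + 1 = j by omega] at hm
      exact Or.inl ⟨by omega, hm⟩
    · subst h1; subst h2; exact Or.inr (Or.inr (Or.inr ⟨by omega, hm⟩))
    · have hi'' : i' = i - 1 := by omega
      have hj'' : j' = j := h2.symm
      subst hi''; subst hj''
      rw [show i - 1 + 1 = i by omega] at hm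
      exact Or.inr (Or.inr (Or.inl ⟨by omega, hm⟩))
  · rintro (⟨hb, hm⟩ | ⟨hb, hm⟩ | ⟨hb, hm⟩ | ⟨hb, hm⟩)
    · exact Or.inl ⟨i, by omega, j - 1, by omega,
        Or.inr ⟨by rw [show j - 1 + 1 = j by omega], by rw [show j - 1 + 1 = j by omega]; exact hm⟩⟩
    · exact Or.inl ⟨i, by omega, j, by omega, Or.inl ⟨rfl, hm⟩⟩
    · exact Or.inr ⟨i - 1, by omega, j, by omega,
        Or.inr ⟨by rw [show i - 1 + 1 = i by omega], by rw [show i - 1 + 1 = i by omega]; exact hm⟩⟩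
    · exact Or.inr ⟨i, by omega, j, by omega, Or.inl ⟨rfl, hm⟩⟩

theorem pvChain (b1 b2 b3 b4 : Bool) :
    (if b1 then false else if b2 then false else if b3 then false else if b4 then false else true)
      = (!b1 && (!b2 && (!b3 && !b4))) := by
  cases b1 <;> cases b2 <;> cases b3 <;> cases b4 <;> rfl

-- the cell-wise agreement of the two programs' tests
theorem cond_eq (T : List (List Int)) (N i j : Int)
    (hi0 : 0 ≤ i) (hi1 : i < N) (hj0 : 0 ≤ j) (hj1 : j < N) :
    bff T N i j = !(PySem.Set.contains (badSet (buildM T N) N) (i, j)) := by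
  have hM := mAt_buildM T N
  rw [Bool.eq_iff_iff, Bool.not_eq_true',
    ← Bool.not_eq_true ((badSet (buildM T N) N).contains (i, j)),
    PySem.Set.contains_iff, bff, pvChain]
  simp only [Bool.and_eq_true, Bool.not_eq_true', Bool.and_eq_false_iff,
    decide_eq_false_iff_not, not_le, not_lt, Bool.not_eq_false]
  rw [cell_bad_iff _ N i j hi0 hi1 hj0 hj1,
    hM i j hi0 hi1 hj0 hj1]
  constructor
  · rintro ⟨h1, h2, h3, h4⟩
    rintro (⟨hb, hm⟩ | ⟨hb, hm⟩ | ⟨hb, hm⟩ | ⟨hb, hm⟩)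
    · rcases h3 with h | h
      · omega
      · rw [identyczne_eq_mask, Bool.not_eq_false', beq_iff_eq] at h
        rw [hM i (j-1) hi0 hi1 (by omega) (by omega), Nat.and_comm] at hm
        exact hm h
    · rcases h4 with h | h
      · omega
      · rw [identyczne_eq_mask, Bool.not_eq_false', beq_iff_eq] at h
        rw [hM i (j+1) hi0 hi1 (by omega) hb] at hm
        exact hm h
    · rcases h1 with h | h
      · omega
      · rw [identyczne_eq_mask, Bool.not_eq_false', beq_iff_eq] at h
        rw [hM (i-1) j (by omega) (by omega) hj0 hj1, Nat.and_comm] at hm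
        exact hm h
    · rcases h2 with h | h
      · omega
      · rw [identyczne_eq_mask, Bool.not_eq_false', beq_iff_eq] at h
        rw [hM (i+1) j (by omega) hb hj0 hj1] at hm
        exact hm h
  · intro hnb
    refine ⟨?_, ?_, ?_, ?_⟩
    · by_cases hb : 0 ≤ i - 1
      · refine Or.inr ?_
        rw [identyczne_eq_mask, Bool.not_eq_false', beq_iff_eq]
        by_contra h
        exact hnb (Or.inr (Or.inr (Or.inl ⟨hb,
          by rw [hM (i-1) j (by omega) (by omega) hj0 hj1, Nat.and_comm]; exact h⟩)))
      · exact Or.inl (by omega)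
    · by_cases hb : i + 1 < N
      · refine Or.inr ?_
        rw [identyczne_eq_mask, Bool.not_eq_false', beq_iff_eq]
        by_contra h
        exact hnb (Or.inr (Or.inr (Or.inr ⟨hb,
          by rw [hM (i+1) j (by omega) hb hj0 hj1]; exact h⟩)))
      · exact Or.inl (by omega)
    · by_cases hb : 0 ≤ j - 1
      · refine Or.inr ?_
        rw [identyczne_eq_mask, Bool.not_eq_false', beq_iff_eq]
        by_contra h
        exact hnb (Or.inl ⟨hb,
          by rw [hM i (j-1) hi0 hi1 (by omega) (by omega), Nat.and_comm]; exact h⟩)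
      · exact Or.inl (by omega)
    · by_cases hb : j + 1 < N
      · refine Or.inr ?_
        rw [identyczne_eq_mask, Bool.not_eq_false', beq_iff_eq]
        by_contra h
        exact hnb (Or.inr (Or.inl ⟨hb,
          by rw [hM i (j+1) hi0 hi1 (by omega) hb]; exact h⟩))
      · exact Or.inl (by omega)

-- ===== VERDICT (by name: the statement is the Claim_ definition above) =====
theorem solve_spec : Claim_equal_solve := by
  intro T _ _
  unfold Spec_solve solve solve_alt
  apply PySem.List.foldl_congr_mem
  intro acc i hi
  rw [PySem.List.mem_pyRange_one] at hi
  apply PySem.List.foldl_congr_mem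
  intro acc2 j hj
  rw [PySem.List.mem_pyRange_one] at hj
  rw [cond_eq T _ i j hi.1 hi.2 hj.1 hj.2]
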